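-- pv_equiv track=rewrite | github.com/UWPCE-PythonCert/IntroToPython-2014 | Solutions/Session04/trigram.py | strip_punctuation
-- ===== SOURCE A (Python) =====
-- import string
--
-- def strip_punctuation(text):
--     """
--     strips the punctuation from a bunch of text
--     """
--     # build a translation table for string.translate:
--     # there are other ways to do this:
--
--     # create a translation table to replace all punctuation with spaces
--     #    -- then split() will remove the extra spaces
--     punctuation = string.punctuation
--     punctuation = punctuation.replace("'", "")  # keep apostropies
--     punctuation = punctuation.replace("-", "")  # keep hyphenated words
--     # building a translation table
--     table = {}
--     for c in punctuation:
--         table[ord(c)] = ' '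
--     # remove punctuation with the translation table
--     text = text.translate(table)
--     # remove "--" -- can't do multiple characters with translate
--     text = text.replace("--", " ")
--
--     return text
-- ===== SOURCE B (Python) =====
-- import string
--
-- def strip_punctuation(text):
--     """
--     strips the punctuation from a bunch of text
--     """
--     punctuation = string.punctuation.replace("'", "").replace("-", "")
--     for c in punctuation:
--         text = text.replace(c, ' ')
--     text = text.replace("--", " ")
--     return text
-- ===== Notes on version B (the rewrite author's own statement) =====
-- stated objective: simpler
-- what changed: Replaces the ord->space translation table plus str.translate single pass with a loop of per-character str.replace full-text scans (same kept punctuation and trailing '--' replace).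
import Mathlib
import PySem

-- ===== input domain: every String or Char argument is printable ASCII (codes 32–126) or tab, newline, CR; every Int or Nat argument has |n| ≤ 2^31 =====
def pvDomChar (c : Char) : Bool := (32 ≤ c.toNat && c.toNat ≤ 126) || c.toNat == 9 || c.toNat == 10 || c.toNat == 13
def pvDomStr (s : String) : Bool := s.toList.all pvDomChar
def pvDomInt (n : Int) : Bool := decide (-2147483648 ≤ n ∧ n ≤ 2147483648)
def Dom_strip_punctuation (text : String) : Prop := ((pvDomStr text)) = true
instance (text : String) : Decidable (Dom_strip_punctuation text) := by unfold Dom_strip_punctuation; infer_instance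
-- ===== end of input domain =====

-- B replaces A's ord->space translation table + single str.translate pass by a loop of per-character
-- str.replace scans over the whole text (objective: simpler; same kept punctuation, same '--' replace).

-- ===== PORT A =====
-- string.punctuation literal
def pvPunctLit : String := "!\"#$%&'()*+,-./:;<=>?@[\\]^_`{|}~"

def strip_punctuation (text : String) : String :=
  let punctuation := pvPunctLit
  let punctuation := PySem.Str.replace punctuation "'" ""   -- keep apostrophes
  let punctuation := PySem.Str.replace punctuation "-" ""   -- keep hyphens
  -- building the translation table: table[ord(c)] = ' '
  let table : PySem.Dict Int String :=
    punctuation.toList.foldl (fun d c => d.insert ((c.toNat : Int)) " ") PySem.Dict.empty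
  -- text.translate(table): hand port, exact here — every value in the table is a str (no None deletions)
  let text := String.ofList (text.toList.flatMap (fun ch =>
    match table.get? ((ch.toNat : Int)) with
    | some s => s.toList
    | none => [ch]))
  let text := PySem.Str.replace text "--" " "
  text

-- ===== PORT B =====
def strip_punctuation_alt (text : String) : String :=
  let punctuation := PySem.Str.replace (PySem.Str.replace pvPunctLit "'" "") "-" ""
  let text := punctuation.toList.foldl
    (fun t c => PySem.Str.replace t (String.ofList [c]) " ") text
  PySem.Str.replace text "--" " "

-- ===== PRECONDITION & SPEC =====
def Spec_strip_punctuation (text : String) (out : String) : Prop := out = strip_punctuation_alt text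
instance (text : String) (out : String) : Decidable (Spec_strip_punctuation text out) := by unfold Spec_strip_punctuation; infer_instance

-- ===== CLAIM (what is proved, stated in full; the proofs are below) =====
def Claim_equal_strip_punctuation : Prop := ∀ (text : String), Dom_strip_punctuation text → Spec_strip_punctuation text (strip_punctuation text)

-- ===== LEMMAS AND PROOFS =====

-- replacing the single character p by the single character r is a pointwise map
theorem pv_replace_go_single (p r : Char) :
    ∀ (fuel : Nat) (l acc : List Char), l.length ≤ fuel →
      PySem.Chars.replace.go [p] [r] fuel l acc
        = acc.reverse ++ l.map (fun c => if c = p then r else c) := by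
  intro fuel
  induction fuel with
  | zero =>
    intro l acc h
    have : l = [] := List.eq_nil_of_length_eq_zero (Nat.le_zero.mp h)
    subst this
    simp [PySem.Chars.replace.go]
  | succ n ih =>
    intro l acc h
    cases l with
    | nil => simp [PySem.Chars.replace.go]
    | cons c t =>
      have ht : t.length ≤ n := by simp at h; omega
      by_cases hc : c = p
      · subst hc
        have hpre : [c].isPrefixOf (c :: t) = true := by simp [List.isPrefixOf]
        simp only [PySem.Chars.replace.go, hpre]
        simp only [if_true, List.length_cons, List.length_nil, List.drop_succ_cons,
          List.drop_zero, List.reverse_cons, List.reverse_nil, List.nil_append]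
        rw [ih _ _ ht]
        simp
      · have hpre : [p].isPrefixOf (c :: t) = false := by
          simp [List.isPrefixOf]
          exact fun hh => (hc hh.symm).elim
        simp only [PySem.Chars.replace.go, hpre]
        simp only [Bool.false_eq_true, if_false]
        rw [ih _ _ ht]
        simp [hc]

theorem pv_replace_single (cs : List Char) (p r : Char) :
    PySem.Chars.replace cs [p] [r] = cs.map (fun c => if c = p then r else c) := by
  simp only [PySem.Chars.replace, List.isEmpty]
  exact pv_replace_go_single p r cs.length cs [] (le_refl _)

-- a fold of single-char substitutions is one membership map
theorem pv_foldl_subst (ps : List Char) (hs : ' ' ∉ ps) :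
    ∀ (cs : List Char),
      ps.foldl (fun t c => t.map (fun x => if x = c then ' ' else x)) cs
        = cs.map (fun x => if x ∈ ps then ' ' else x) := by
  induction ps with
  | nil => intro cs; simp
  | cons p ps ih =>
    intro cs
    have hs' : ' ' ∉ ps := fun h => hs (List.mem_cons_of_mem _ h)
    have hsp : ¬ (' ' = p) := fun h => hs (h ▸ List.mem_cons_self)
    simp only [List.foldl_cons]
    rw [ih hs', List.map_map]
    apply List.map_congr_left
    intro x _
    by_cases hx : x = p
    · subst hx
      simp
    · by_cases hx2 : x ∈ ps <;> simp [hx, hx2, List.mem_cons]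

-- lookup in a table built by inserting a constant value at each key of a list
theorem pv_get?_foldl_insert (v : String) (ks : List Char) :
    ∀ (d : PySem.Dict Int String) (k : Int),
      (ks.foldl (fun d c => d.insert ((c.toNat : Int)) v) d).get? k
        = if k ∈ ks.map (fun c => ((c.toNat : Int))) then some v else d.get? k := by
  induction ks with
  | nil => intro d k; simp
  | cons c ks ih =>
    intro d k
    simp only [List.foldl_cons, List.map_cons, List.mem_cons]
    rw [ih]
    by_cases hk : k ∈ ks.map (fun c => ((c.toNat : Int)))
    · simp [hk]
    · simp [hk, PySem.Dict.get?_insert]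

theorem pv_toNat_int_inj {a b : Char} (h : ((a.toNat : Int)) = ((b.toNat : Int))) : a = b := by
  have h1 : a.toNat = b.toNat := by exact_mod_cast h
  exact Char.ext (UInt32.toNat_inj.mp h1)

-- the kept-punctuation list, named
def pvKept : List Char := "!\"#$%&()*+,./:;<=>?@[\\]^_`{|}~".toList

set_option maxRecDepth 20000 in
theorem pv_kept_eq :
    (PySem.Str.replace (PySem.Str.replace pvPunctLit "'" "") "-" "").toList = pvKept := by
  decide

theorem pv_space_not_kept : ' ' ∉ pvKept := by decide

-- B's string-level fold, moved to lists
theorem pv_alt_fold (ps : List Char) :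
    ∀ (t : String),
      (ps.foldl (fun t c => PySem.Str.replace t (String.ofList [c]) " ") t).toList
        = ps.foldl (fun l c => PySem.Chars.replace l [c] [' ']) t.toList := by
  induction ps with
  | nil => intro t; simp
  | cons c ps ih =>
    intro t
    simp only [List.foldl_cons]
    rw [ih]
    congr 1
    simp [PySem.Str.replace]

theorem pv_flatMap_singleton {α β : Type} (g : α → β) (l : List α) :
    l.flatMap (fun x => [g x]) = l.map g := by
  induction l with
  | nil => rfl
  | cons a t ih => simp [List.flatMap_cons, ih]

set_option maxRecDepth 20000 in
theorem pv_main (text : String) :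
    strip_punctuation text = strip_punctuation_alt text := by
  simp only [strip_punctuation, strip_punctuation_alt]
  refine congrArg (fun s => PySem.Str.replace s "--" " ") ?_
  apply String.toList_inj.mp
  rw [String.toList_ofList, pv_alt_fold, pv_kept_eq]
  have hB : pvKept.foldl (fun l c => PySem.Chars.replace l [c] [' ']) text.toList
      = text.toList.map (fun x => if x ∈ pvKept then ' ' else x) := by
    have : (fun (l : List Char) (c : Char) => PySem.Chars.replace l [c] [' '])
        = fun l c => l.map (fun x => if x = c then ' ' else x) := by
      funext l c; exact pv_replace_single l c ' '
    rw [this]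
    exact pv_foldl_subst pvKept pv_space_not_kept text.toList
  rw [hB]
  -- A's flatMap with the table is the same map
  have hflat : ∀ ch : Char,
      (match ((PySem.Str.replace (PySem.Str.replace pvPunctLit "'" "") "-" "").toList.foldl
          (fun d c => d.insert ((c.toNat : Int)) " ") PySem.Dict.empty).get? ((ch.toNat : Int)) with
        | some s => s.toList
        | none => [ch])
      = [if ch ∈ pvKept then ' ' else ch] := by
    intro ch
    rw [pv_kept_eq, pv_get?_foldl_insert]
    by_cases hm : ch ∈ pvKept
    · have : ((ch.toNat : Int)) ∈ pvKept.map (fun c => ((c.toNat : Int))) :=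
        List.mem_map_of_mem hm
      simp [this, hm]
    · have : ((ch.toNat : Int)) ∉ pvKept.map (fun c => ((c.toNat : Int))) := by
        intro h
        obtain ⟨c, hc, hce⟩ := List.mem_map.mp h
        exact hm ((pv_toNat_int_inj hce) ▸ hc)
      simp [this, hm, PySem.Dict.get?_empty]
  calc text.toList.flatMap (fun ch =>
        match ((PySem.Str.replace (PySem.Str.replace pvPunctLit "'" "") "-" "").toList.foldl
            (fun d c => d.insert ((c.toNat : Int)) " ") PySem.Dict.empty).get? ((ch.toNat : Int)) with
          | some s => s.toList
          | none => [ch])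
      = text.toList.flatMap (fun ch => [if ch ∈ pvKept then ' ' else ch]) := by
        apply List.flatMap_congr; intro ch _; exact hflat ch
    _ = text.toList.map (fun x => if x ∈ pvKept then ' ' else x) :=
        pv_flatMap_singleton _ _

-- ===== VERDICT (by name: the statement is the Claim_ definition above) =====
theorem strip_punctuation_spec : Claim_equal_strip_punctuation := by
  intro text _
  unfold Spec_strip_punctuation
  exact pv_main text
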